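-- pv_equiv track=rewrite | github.com/Trifase/aoc23 | 11.py | get_galaxies
-- ===== SOURCE A (Python) =====
-- def get_galaxies(grid: list[list[str]]) -> tuple[set[tuple[int, int]], list[list[str]]]:
--     galaxies = set()
--     i = 1
--     new_grid = []
--     for y in range(len(grid)):
--         new_line = list(grid[y])
--         for x in range(len(grid[y])):
--             if new_line[x] == "#":
--                 galaxies.add((y, x))
--                 new_line[x] = str(i)
--                 i += 1
--         new_grid.append(new_line)
--     return galaxies, new_grid
-- ===== SOURCE B (Python) =====
-- def get_galaxies(grid: list[list[str]]) -> tuple[set[tuple[int, int]], list[list[str]]]: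
--     # Prefix-sum decomposition: each row's first label is 1 + number of galaxies
--     # in earlier rows, so rows are relabeled independently (no counter threaded
--     # through the whole grid).
--     hits = [[x for x, c in enumerate(row) if c == "#"] for row in grid]
--     starts = []
--     total = 1
--     for xs in hits:
--         starts.append(total)
--         total += len(xs)
--     new_grid = [
--         _relabel(row, xs, s) for row, (xs, s) in zip(grid, zip(hits, starts))
--     ]
--     galaxies = {(y, x) for y, xs in enumerate(hits) for x in xs}
--     return galaxies, new_grid
--
--
-- def _relabel(row, xs, start):
--     new_row = list(row)
--     for k, x in enumerate(xs):
--         new_row[x] = str(start + k)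
--     return new_row
-- ===== Notes on version B (the rewrite author's own statement) =====
-- stated objective: alternative
-- what changed: Instead of A's single interleaved scan threading one global counter through nested cell loops, B computes per-row galaxy column lists, derives each row's starting label by a prefix sum of the row counts, and then relabels every row independently from its own start (rows no longer depend on an interleaved running state).
import Mathlib
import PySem

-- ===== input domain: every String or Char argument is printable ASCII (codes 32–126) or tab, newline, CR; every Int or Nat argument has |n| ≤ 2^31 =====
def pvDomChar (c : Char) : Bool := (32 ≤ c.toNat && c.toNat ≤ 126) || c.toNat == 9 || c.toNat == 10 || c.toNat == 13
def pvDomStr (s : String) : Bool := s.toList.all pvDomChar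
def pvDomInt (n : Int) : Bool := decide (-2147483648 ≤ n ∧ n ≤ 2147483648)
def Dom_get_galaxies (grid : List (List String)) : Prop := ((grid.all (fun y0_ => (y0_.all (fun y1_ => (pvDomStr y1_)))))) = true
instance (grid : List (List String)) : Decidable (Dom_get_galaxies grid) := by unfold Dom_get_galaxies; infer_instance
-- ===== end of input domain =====

-- B replaces A's single interleaved scan, which threads one global counter through nested
-- cell loops, by a prefix-sum decomposition: per-row galaxy column lists, each row's first
-- label computed from a prefix sum of row counts, and each row relabeled independently
-- (objective: alternative; return value only — neither implementation mutates its argument).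

-- ===== PORT A =====
-- inner loop body: 'if new_line[x] == "#": galaxies.add((y,x)); new_line[x] = str(i); i += 1'
def pvA_inner (y : Int) (st2 : List String × List (Int × Int) × Int) (x : Nat) :
    List String × List (Int × Int) × Int :=
  if PySem.List.pyGetD st2.1 (Int.ofNat x) "" == "#" then
    (PySem.List.pySetD st2.1 (Int.ofNat x) (PySem.Int.toStr st2.2.2),
     PySem.Set.add st2.2.1 (y, Int.ofNat x), st2.2.2 + 1)
  else st2

-- outer loop body: copy grid[y], run the inner loop, append the line
def pvA_outer (grid : List (List String))
    (st : List (Int × Int) × List (List String) × Int) (y : Nat) :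
    List (Int × Int) × List (List String) × Int :=
  let new_line := PySem.List.pyGetD grid (Int.ofNat y) []
  let st2 := (List.range new_line.length).foldl (pvA_inner (Int.ofNat y)) (new_line, st.1, st.2.2)
  (st2.2.1, st.2.1 ++ [st2.1], st2.2.2)

def get_galaxies (grid : List (List String)) : (List (Int × Int)) × List (List String) :=
  let st := (List.range grid.length).foldl (pvA_outer grid) ([], [], 1)
  (st.1, st.2.1)

-- ===== PORT B =====
-- '[x for x, c in enumerate(row) if c == "#"]'
def pvB_hitsRow (row : List String) : List Int :=
  ((PySem.List.enumerate row 0).filter (fun xc => xc.2 == "#")).map (fun xc => xc.1)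

-- '_relabel(row, xs, start)': copy the row, write str(start+k) at position xs[k]
def pvB_relab (rxs : List String × List Int × Int) : List String :=
  (PySem.List.enumerate rxs.2.1 0).foldl
    (fun nr kx => PySem.List.pySetD nr kx.2 (PySem.Int.toStr (rxs.2.2 + kx.1))) rxs.1

def get_galaxies_alt (grid : List (List String)) : (List (Int × Int)) × List (List String) :=
  let hits := grid.map pvB_hitsRow
  let starts := (hits.foldl (fun st xs => (st.1 ++ [st.2], st.2 + (xs.length : Int)))
      (([] : List Int), (1 : Int))).1
  let new_grid := (grid.zip (hits.zip starts)).map pvB_relab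
  let galaxies := PySem.Set.ofList
      ((PySem.List.enumerate hits 0).flatMap (fun yxs => yxs.2.map (fun x => (yxs.1, x))))
  (galaxies, new_grid)

-- ===== PRECONDITION & SPEC =====
def Spec_get_galaxies (grid : List (List String)) (out : (List (Int × Int)) × List (List String)) : Prop := out = get_galaxies_alt grid
instance (grid : List (List String)) (out : (List (Int × Int)) × List (List String)) : Decidable (Spec_get_galaxies grid out) := by unfold Spec_get_galaxies; infer_instance

-- ===== CLAIM (what is proved, stated in full; the proofs are below) =====
def Claim_equal_get_galaxies : Prop := ∀ (grid : List (List String)), Dom_get_galaxies grid → Spec_get_galaxies grid (get_galaxies grid)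

-- ===== LEMMAS AND PROOFS =====

-- reference description both ports are reduced to
def cntR : List String → Nat
  | [] => 0
  | c :: cs => (if c == "#" then 1 else 0) + cntR cs

def rowRel (i : Int) : List String → List String
  | [] => []
  | c :: cs => if c == "#" then PySem.Int.toStr i :: rowRel (i + 1) cs else c :: rowRel i cs

def rowHits (x : Int) : List String → List Int
  | [] => []
  | c :: cs => if c == "#" then x :: rowHits (x + 1) cs else rowHits (x + 1) cs

def gridPos (y : Int) : List (List String) → List (Int × Int)
  | [] => []
  | r :: rs => (rowHits 0 r).map (fun x => (y, x)) ++ gridPos (y + 1) rs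

def gridRel (i : Int) : List (List String) → List (List String)
  | [] => []
  | r :: rs => rowRel i r :: gridRel (i + (cntR r : Int)) rs

-- prefix sums of the per-row galaxy counts, starting at t
def pstarts (t : Int) : List (List Int) → List Int
  | [] => []
  | xs :: r => t :: pstarts (t + (xs.length : Int)) r

lemma getd_append_len {α : Type} (pre : List α) (c : α) (cs : List α) (d : α) :
    (pre ++ c :: cs).getD pre.length d = c := by
  induction pre with
  | nil => rfl
  | cons a as ih => simp [ih]

lemma set_append_len {α : Type} (pre : List α) (c : α) (cs : List α) (v : α) :
    (pre ++ c :: cs).set pre.length v = (pre ++ [v]) ++ cs := by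
  induction pre with
  | nil => rfl
  | cons a as ih => simp [ih]

lemma len_rowHits (row : List String) : ∀ (x : Int), (rowHits x row).length = cntR row := by
  induction row with
  | nil => intro x; rfl
  | cons c cs ih =>
    intro x
    by_cases hc : c = "#" <;> simp [rowHits, cntR, hc, ih] <;> omega

lemma innerA (y : Int) : ∀ (suf pre : List String) (g : List (Int × Int)) (i : Int),
    (List.range' pre.length suf.length).foldl (pvA_inner y) (pre ++ suf, g, i)
      = (pre ++ rowRel i suf,
         (rowHits (pre.length : Int) suf).foldl (fun s x => PySem.Set.add s (y, x)) g,
         i + (cntR suf : Int)) := by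
  intro suf
  induction suf with
  | nil => intro pre g i; simp [rowRel, rowHits, cntR]
  | cons c cs ih =>
    intro pre g i
    rw [show (c :: cs).length = cs.length + 1 from rfl, List.range'_succ, List.foldl_cons]
    have hget : PySem.List.pyGetD (pre ++ c :: cs) (Int.ofNat pre.length) "" = c := by
      simp [PySem.List.pyGetD_natCast, getd_append_len]
    by_cases hc : c = "#"
    · subst hc
      have hstep : pvA_inner y (pre ++ "#" :: cs, g, i) pre.length
          = ((pre ++ [PySem.Int.toStr i]) ++ cs, PySem.Set.add g (y, (pre.length : Int)), i + 1) := by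
        simp [pvA_inner, hget, PySem.List.pySetD_natCast, set_append_len]
      rw [hstep]
      have h2 := ih (pre ++ [PySem.Int.toStr i]) (PySem.Set.add g (y, (pre.length : Int))) (i + 1)
      push_cast at h2 ⊢
      simp only [List.length_append, List.length_cons, List.length_nil] at h2
      rw [h2]
      simp [rowRel, rowHits, cntR]
      omega
    · have hcb : (c == "#") = false := by simp [hc]
      have hstep : pvA_inner y (pre ++ c :: cs, g, i) pre.length = (pre ++ c :: cs, g, i) := by
        simp [pvA_inner, hget, hcb]
      rw [hstep]
      have h2 := ih (pre ++ [c]) g i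
      push_cast at h2 ⊢
      simp only [List.length_append, List.length_cons, List.length_nil] at h2
      rw [show pre ++ c :: cs = (pre ++ [c]) ++ cs by simp] at *
      rw [h2]
      simp [rowRel, rowHits, cntR, hcb]

lemma outerA (G : List (List String)) :
    ∀ (suf pregrid : List (List String)), G = pregrid ++ suf →
    ∀ (g : List (Int × Int)) (acc : List (List String)) (i : Int),
      (List.range' pregrid.length suf.length).foldl (pvA_outer G) (g, acc, i)
        = ((gridPos (pregrid.length : Int) suf).foldl PySem.Set.add g,
           acc ++ gridRel i suf, i + ((suf.map cntR).sum : Int)) := by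
  intro suf
  induction suf with
  | nil => intro pregrid h g acc i; simp [gridPos, gridRel]
  | cons r rs ih =>
    intro pregrid h g acc i
    rw [show (r :: rs).length = rs.length + 1 from rfl, List.range'_succ, List.foldl_cons]
    have hget : PySem.List.pyGetD G (Int.ofNat pregrid.length) [] = r := by
      subst h; simp [PySem.List.pyGetD_natCast, getd_append_len]
    have h0 := innerA (Int.ofNat pregrid.length) r [] g i
    simp only [List.length_nil, List.nil_append, Nat.cast_zero] at h0
    have hstep : pvA_outer G (g, acc, i) pregrid.length
        = ((rowHits 0 r).foldl (fun s x => PySem.Set.add s (Int.ofNat pregrid.length, x)) g,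
           acc ++ [rowRel i r], i + (cntR r : Int)) := by
      simp only [pvA_outer]
      rw [hget, List.range_eq_range', h0]
    rw [hstep]
    have h2 := ih (pregrid ++ [r]) (by simp [h])
      ((rowHits 0 r).foldl (fun s x => PySem.Set.add s (Int.ofNat pregrid.length, x)) g)
      (acc ++ [rowRel i r]) (i + (cntR r : Int))
    simp only [List.length_append, List.length_cons, List.length_nil, Nat.zero_add,
      List.append_assoc, List.singleton_append] at h2
    push_cast at h2 ⊢
    rw [h2]
    simp [gridPos, gridRel, List.foldl_append, List.foldl_map]
    omega

-- B lemma 1: the per-row hit list is rowHits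
lemma hitsRowB : ∀ (row : List String) (x : Int),
    ((PySem.List.enumerate row x).filter (fun xc => xc.2 == "#")).map (fun xc => xc.1)
      = rowHits x row := by
  intro row
  induction row with
  | nil => intro x; simp [rowHits, PySem.List.enumerate_nil]
  | cons c cs ih =>
    intro x
    rw [PySem.List.enumerate_cons]
    by_cases hc : c = "#" <;> simp [rowHits, hc, ih]

-- B lemma 2: the starts loop computes the prefix sums
lemma startsB : ∀ (hs : List (List Int)) (acc : List Int) (t : Int),
    (hs.foldl (fun st xs => (st.1 ++ [st.2], st.2 + (xs.length : Int))) (acc, t)).1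
      = acc ++ pstarts t hs := by
  intro hs
  induction hs with
  | nil => intro acc t; simp [pstarts]
  | cons xs r ih => intro acc t; simp [pstarts, ih]

-- B lemma 3: relabeling one row from its start gives rowRel
lemma relabRowB : ∀ (suf pre : List String) (s k : Int),
    (PySem.List.enumerate (rowHits (pre.length : Int) suf) k).foldl
        (fun nr kx => PySem.List.pySetD nr kx.2 (PySem.Int.toStr (s + kx.1))) (pre ++ suf)
      = pre ++ rowRel (s + k) suf := by
  intro suf
  induction suf with
  | nil => intro pre s k; simp [rowHits, rowRel, PySem.List.enumerate_nil]
  | cons c cs ih =>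
    intro pre s k
    by_cases hc : c = "#"
    · subst hc
      rw [show rowHits ((pre.length : Nat) : Int) ("#" :: cs)
            = ((pre.length : Nat) : Int) :: rowHits (((pre.length : Nat) : Int) + 1) cs from by
          simp [rowHits]]
      rw [PySem.List.enumerate_cons, List.foldl_cons]
      have hw : PySem.List.pySetD (pre ++ "#" :: cs) ((pre.length : Nat) : Int)
            (PySem.Int.toStr (s + k))
          = (pre ++ [PySem.Int.toStr (s + k)]) ++ cs := by
        simp [PySem.List.pySetD_natCast, set_append_len]
      rw [hw]
      have h2 := ih (pre ++ [PySem.Int.toStr (s + k)]) s (k + 1)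
      simp only [List.length_append, List.length_cons, List.length_nil, Nat.zero_add,
        List.append_assoc, List.singleton_append] at h2
      push_cast at h2 ⊢
      simp only [List.append_assoc, List.singleton_append]
      rw [h2]
      simp [rowRel]
      ring_nf
    · have hcb : (c == "#") = false := by simp [hc]
      rw [show rowHits ((pre.length : Nat) : Int) (c :: cs)
            = rowHits (((pre.length : Nat) : Int) + 1) cs from by simp [rowHits, hcb]]
      have h2 := ih (pre ++ [c]) s k
      simp only [List.length_append, List.length_cons, List.length_nil, Nat.zero_add,
        List.append_assoc, List.singleton_append] at h2
      push_cast at h2 ⊢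
      rw [show pre ++ c :: cs = (pre ++ [c]) ++ cs by simp] at *
      rw [h2]
      simp [rowRel, hcb]

-- B lemma 4: mapping the relabeler over the zipped rows gives gridRel
lemma gridB : ∀ (rows : List (List String)) (t : Int),
    ((rows.zip ((rows.map pvB_hitsRow).zip (pstarts t (rows.map pvB_hitsRow)))).map pvB_relab)
      = gridRel t rows := by
  intro rows
  induction rows with
  | nil => intro t; simp [gridRel]
  | cons r rs ih =>
    intro t
    simp only [List.map_cons, pstarts, List.zip_cons_cons]
    have h1 : pvB_relab (r, pvB_hitsRow r, t) = rowRel t r := by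
      unfold pvB_relab
      simp only
      have := relabRowB r [] t 0
      simpa [pvB_hitsRow, hitsRowB] using this
    have hlen : ((pvB_hitsRow r).length : Int) = (cntR r : Int) := by
      simp [pvB_hitsRow, hitsRowB, len_rowHits]
    rw [h1, hlen, ih]
    rfl

-- B lemma 5: the galaxies comprehension is gridPos
lemma posB : ∀ (rows : List (List String)) (y : Int),
    (PySem.List.enumerate (rows.map pvB_hitsRow) y).flatMap
        (fun yxs => yxs.2.map (fun x => (yxs.1, x)))
      = gridPos y rows := by
  intro rows
  induction rows with
  | nil => intro y; simp [gridPos, PySem.List.enumerate_nil]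
  | cons r rs ih =>
    intro y
    rw [List.map_cons, PySem.List.enumerate_cons]
    simp [gridPos, pvB_hitsRow, hitsRowB, ih]

lemma A_ref (grid : List (List String)) :
    get_galaxies grid = ((gridPos 0 grid).foldl PySem.Set.add [], gridRel 1 grid) := by
  have h := outerA grid grid [] rfl [] [] 1
  simp only [List.length_nil, Nat.cast_zero, List.nil_append] at h
  simp [get_galaxies, List.range_eq_range', h]

lemma B_ref (grid : List (List String)) :
    get_galaxies_alt grid = ((gridPos 0 grid).foldl PySem.Set.add [], gridRel 1 grid) := by
  have hs := startsB (grid.map pvB_hitsRow) [] 1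
  simp only [List.nil_append] at hs
  have hg := gridB grid 1
  have hp := posB grid 0
  simp [get_galaxies_alt, hs, hg, hp, PySem.Set.ofList_eq_foldl]

-- ===== VERDICT (by name: the statement is the Claim_ definition above) =====
theorem get_galaxies_spec : Claim_equal_get_galaxies := by
  intro grid _
  unfold Spec_get_galaxies
  rw [A_ref, B_ref]
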